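-- pv_equiv track=rewrite | github.com/guige2023/rabai_autoclick | utils/base32_utils.py | is_valid_base32
-- ===== SOURCE A (Python) =====
-- BASE32_ALPHABET = "ABCDEFGHIJKLMNOPQRSTUVWXYZ234567"
--
-- BASE32_PAD_CHAR = "="
--
-- def is_valid_base32(data: str) -> bool:
--     """
--     Check if string is valid Base32.
--
--     Args:
--         data: String to validate
--
--     Returns:
--         True if valid Base32
--     """
--     if not data:
--         return False
--
--     data = data.upper().strip()
--
--     if len(data) < 1:
--         return False
--
--     for char in data:
--         if char not in BASE32_ALPHABET and char != BASE32_PAD_CHAR: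
--             return False
--
--     pad_count = data.count(BASE32_PAD_CHAR)
--     if pad_count > 0:
--         if pad_count > 6:
--             return False
--         if not data.endswith(BASE32_PAD_CHAR * pad_count):
--             return False
--
--     return True
-- ===== SOURCE B (Python) =====
-- BASE32_ALPHABET = "ABCDEFGHIJKLMNOPQRSTUVWXYZ234567"
--
-- BASE32_PAD_CHAR = "="
--
--
-- def is_valid_base32(data: str) -> bool:
--     """Split at the first pad char: the body must be alphabet-only, the tail
--     must be nothing but pads and at most six of them."""
--     if not data:
--         return False
--     data = data.upper().strip()
--     if not data:
--         return False
--     i = data.find(BASE32_PAD_CHAR)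
--     if i == -1:
--         body, pads = data, ""
--     else:
--         body, pads = data[:i], data[i:]
--     if len(pads) > 6:
--         return False
--     return all(c in BASE32_ALPHABET for c in body) and pads == BASE32_PAD_CHAR * len(pads)
-- ===== Notes on version B (the rewrite author's own statement) =====
-- stated objective: alternative
-- what changed: Instead of counting all pad characters over the whole string and checking endswith against a replicated pad string, B splits the string at the first pad character found by str.find into a body and a tail, and validates the body as alphabet-only and the tail as at most six contiguous pads.
import Mathlib
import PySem

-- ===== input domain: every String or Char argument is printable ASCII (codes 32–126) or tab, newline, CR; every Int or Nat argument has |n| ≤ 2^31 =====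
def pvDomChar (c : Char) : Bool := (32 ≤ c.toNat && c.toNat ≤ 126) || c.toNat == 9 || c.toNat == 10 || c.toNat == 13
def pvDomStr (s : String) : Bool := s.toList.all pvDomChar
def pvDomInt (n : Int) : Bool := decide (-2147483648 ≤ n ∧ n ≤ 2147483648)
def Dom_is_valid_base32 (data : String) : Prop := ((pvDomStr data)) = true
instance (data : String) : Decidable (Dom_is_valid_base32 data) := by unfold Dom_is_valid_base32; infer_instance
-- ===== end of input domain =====

-- B replaces A's pad-count plus endswith logic by splitting the string at the FIRST
-- pad character (alternative decomposition, same O(n) cost; return values identical).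

def pvB32Alpha : String := "ABCDEFGHIJKLMNOPQRSTUVWXYZ234567"
def pvB32Pad : String := "="

-- ===== PORT A =====
def is_valid_base32 (data : String) : Bool :=
  if PySem.Str.len data == 0 then false
  else
    let d := PySem.Str.strip (PySem.Str.upper data)
    if PySem.Str.len d < 1 then false
    else if d.toList.all (fun c =>
        PySem.Str.isIn (String.ofList [c]) pvB32Alpha
          || PySem.Str.isIn (String.ofList [c]) pvB32Pad) = false then false
    else
      let padCount := PySem.Str.count d pvB32Pad
      if padCount > 0 then
        if padCount > 6 then false
        else if PySem.Str.endswith d (String.ofList (List.replicate padCount '=')) = false then false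
        else true
      else true

-- ===== PORT B =====
def is_valid_base32_alt (data : String) : Bool :=
  if PySem.Str.len data == 0 then false
  else
    let d := PySem.Str.strip (PySem.Str.upper data)
    if PySem.Str.len d == 0 then false
    else
      let i := PySem.Str.find d pvB32Pad
      let body := if i == -1 then d else PySem.Str.slice d none (some i)
      let pads := if i == -1 then "" else PySem.Str.slice d (some i) none
      if PySem.Str.len pads > 6 then false
      else
        body.toList.all (fun c => PySem.Str.isIn (String.ofList [c]) pvB32Alpha) &&
          (pads.toList == List.replicate pads.toList.length '=')

-- ===== PRECONDITION & SPEC =====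
def Spec_is_valid_base32 (data : String) (out : Bool) : Prop := out = is_valid_base32_alt data
instance (data : String) (out : Bool) : Decidable (Spec_is_valid_base32 data out) := by unfold Spec_is_valid_base32; infer_instance

-- ===== CLAIM (what is proved, stated in full; the proofs are below) =====
def Claim_equal_is_valid_base32 : Prop := ∀ (data : String), Dom_is_valid_base32 data → Spec_is_valid_base32 data (is_valid_base32 data)

-- ===== LEMMAS AND PROOFS =====

lemma pv_count_go_singleton (c : Char) (l : List Char) (fuel acc : Nat) (h : l.length ≤ fuel) :
    PySem.Chars.count.go [c] fuel l acc = acc + l.count c := by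
  induction l generalizing fuel acc with
  | nil => cases fuel <;> simp [PySem.Chars.count.go]
  | cons a t ih =>
    cases fuel with
    | zero => simp at h
    | succ f =>
      rw [PySem.Chars.count.go]
      by_cases hc : c = a
      · subst hc
        simp only [List.isPrefixOf, Bool.and_true, beq_self_eq_true, if_pos,
          List.length_cons, List.drop_succ_cons, List.isPrefixOf_nil_left,
          List.length_nil, List.drop_zero]
        rw [ih f (acc+1) (by simpa using h)]
        simp [List.count_cons]
        omega
      · have hpf : ([c].isPrefixOf (a :: t)) = false := by
          simp [List.isPrefixOf, hc]
        rw [hpf]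
        simp only [Bool.false_eq_true, if_false]
        rw [ih f acc (by simpa using h)]
        simp [Ne.symm hc]

lemma pv_count_singleton (l : List Char) (c : Char) :
    PySem.Chars.count l [c] = l.count c := by
  rw [PySem.Chars.count]
  simp [pv_count_go_singleton c l l.length 0 le_rfl]

lemma pv_mem_single_iff (c : Char) (s : String) :
    PySem.Str.isIn (String.ofList [c]) s = true ↔ c ∈ s.toList := by
  rw [PySem.Str.isIn_eq]
  simp [PySem.Chars.isIn_iff_infix, List.singleton_infix_iff]

lemma pv_lhs_iff (x y : Bool) (k : Nat) :
    ((if x = false then false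
     else if k > 0 then
       if k > 6 then false
       else if y = false then false
       else true
     else true) = true)
      ↔ (x = true ∧ (k > 0 → k ≤ 6 ∧ y = true)) := by
  cases x <;> cases y <;> split_ifs <;> simp_all

lemma pv_rhs_iff (a b : Bool) (n : Nat) :
    ((if (n : Int) > 6 then false else a && b) = true) ↔ (n ≤ 6 ∧ a = true ∧ b = true) := by
  split_ifs with h <;> simp_all

lemma pv_mem_take (l : List Char) (n : Nat) (c : Char) (hc : c ∈ l.take n) :
    ∃ m, ∃ hm : m < l.length, m < n ∧ l[m] = c := by
  obtain ⟨m, hm, he⟩ := List.getElem_of_mem hc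
  rw [List.length_take] at hm
  refine ⟨m, by omega, by omega, ?_⟩
  rw [← he, List.getElem_take]

lemma pv_getElem_mem_take (l : List Char) (n m : Nat) (hm : m < l.length) (h : m < n) :
    l[m] ∈ l.take n := by
  have : (l.take n)[m]'(by simp [List.length_take]; omega) = l[m] := List.getElem_take ..
  rw [← this]; exact List.getElem_mem _

lemma pv_core_eq (l : List Char) :
    (if (l.all fun c =>
        PySem.Str.isIn (String.ofList [c]) pvB32Alpha
          || PySem.Str.isIn (String.ofList [c]) pvB32Pad) = false then false
     else if List.count '=' l > 0 then
       if List.count '=' l > 6 then false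
       else if PySem.Chars.endswith l (List.replicate (List.count '=' l) '=') = false then false
       else true
     else true)
  = (if ((if (PySem.Chars.find l ['='] == -1) = true then ([] : List Char)
          else PySem.List.slice l (some (PySem.Chars.find l ['='])) none).length : Int) > 6 then false
     else ((if (PySem.Chars.find l ['='] == -1) = true then l
            else PySem.List.slice l none (some (PySem.Chars.find l ['=']))).all
              fun c => PySem.Str.isIn (String.ofList [c]) pvB32Alpha) &&
          ((if (PySem.Chars.find l ['='] == -1) = true then ([] : List Char)
            else PySem.List.slice l (some (PySem.Chars.find l ['='])) none) ==
           List.replicate (if (PySem.Chars.find l ['='] == -1) = true then ([] : List Char)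
            else PySem.List.slice l (some (PySem.Chars.find l ['='])) none).length '=')) := by
  by_cases hm : '=' ∈ l
  · -- '=' occurs in l
    have hinf : ['='] <:+: l := (List.singleton_infix_iff ..).mpr hm
    have hpos : 0 ≤ PySem.Chars.find l ['='] := (PySem.Chars.find_nonneg_iff ..).mpr hinf
    obtain ⟨hpre, hmin⟩ := PySem.Chars.find_spec hpos
    set j := (PySem.Chars.find l ['=']).toNat with hjdef
    have hfi : PySem.Chars.find l ['='] = (j : Int) := by omega
    have hne : (((j:Nat):Int) == -1) = false := by simp
    simp only [hfi, hne, Bool.false_eq_true, if_false,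
      PySem.List.slice_from l (by positivity : (0:Int) ≤ (j:Int)),
      PySem.List.slice_to l (by positivity : (0:Int) ≤ (j:Int)), Int.toNat_natCast]
    -- basic facts about j
    obtain ⟨t, ht⟩ := hpre
    have hdropj : l.drop j = '=' :: t := ht.symm
    have hj_lt : j < l.length := by
      by_contra h
      push_neg at h
      rw [List.drop_eq_nil_of_le h] at hdropj
      simp at hdropj
    have hlj : l[j] = '=' := by
      have := List.drop_eq_getElem_cons hj_lt
      rw [hdropj] at this
      exact (List.cons.injEq _ _ _ _ ▸ this).1.symm
    have F1 : '=' ∉ l.take j := by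
      intro hc
      obtain ⟨m, hm2, hmj, he⟩ := pv_mem_take l j '=' hc
      refine hmin m hmj ⟨l.drop (m+1), ?_⟩
      rw [← he, List.singleton_append, List.drop_eq_getElem_cons hm2]
    have hsplit : List.count '=' l = List.count '=' (l.drop j) := by
      conv_lhs => rw [← List.take_append_drop j l]
      rw [List.count_append, List.count_eq_zero.mpr F1, Nat.zero_add]
    have hk1 : 0 < List.count '=' l := List.count_pos_iff.mpr hm
    -- suffix condition ↔ drop j is all pads
    have hsuffix_iff : (List.replicate (List.count '=' l) '=' <:+ l) ↔ (∀ c ∈ l.drop j, c = '=') := by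
      constructor
      · intro hs
        have hrep : List.replicate (List.count '=' l) '=' = l.drop (l.length - List.count '=' l) := by
          have := List.suffix_iff_eq_drop.mp hs
          simpa [List.length_replicate] using this
        have hkle : List.count '=' l ≤ l.length := List.count_le_length
        have hcd : List.count '=' (l.drop (l.length - List.count '=' l)) = List.count '=' l := by
          rw [← hrep]; exact List.count_replicate_self
        have hct : List.count '=' (l.take (l.length - List.count '=' l)) = 0 := by
          have h2 := congrArg (List.count '=') (List.take_append_drop (l.length - List.count '=' l) l)
          rw [List.count_append, hcd] at h2
          omega
        have hj_ge : l.length - List.count '=' l ≤ j := by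
          by_contra h
          push_neg at h
          have hmem : l[j] ∈ l.take (l.length - List.count '=' l) :=
            pv_getElem_mem_take l _ j hj_lt h
          rw [hlj] at hmem
          exact absurd (List.count_eq_zero.mp hct) (fun hz => hz hmem)
        have hj_le : j ≤ l.length - List.count '=' l := by
          by_contra h
          push_neg at h
          refine hmin _ h ?_
          rw [← hrep]
          obtain ⟨k, hk⟩ : ∃ k, List.count '=' l = k + 1 := ⟨List.count '=' l - 1, by omega⟩
          rw [hk, List.replicate_succ]
          exact ⟨List.replicate k '=', rfl⟩
        have hjeq : j = l.length - List.count '=' l := le_antisymm hj_le hj_ge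
        intro c hc
        rw [hjeq, ← hrep] at hc
        exact List.eq_of_mem_replicate hc
      · intro hall
        have hcd : List.count '=' (l.drop j) = (l.drop j).length :=
          List.count_eq_length.mpr (fun b hb => (hall b hb).symm)
        have hkm : List.count '=' l = (l.drop j).length := by rw [hsplit, hcd]
        have hdrep : l.drop j = List.replicate (l.drop j).length '=' :=
          List.eq_replicate_iff.mpr ⟨rfl, hall⟩
        rw [hkm, ← hdrep]
        exact List.drop_suffix j l
    rw [Bool.eq_iff_iff, pv_lhs_iff, pv_rhs_iff]
    simp only [List.all_eq_true, pv_mem_single_iff, PySem.Chars.endswith_iff, beq_iff_eq,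
      Bool.or_eq_true, show pvB32Pad.toList = ['='] from rfl, List.mem_singleton]
    constructor
    · rintro ⟨hq, himp⟩
      obtain ⟨hk6, hsuf⟩ := himp hk1
      have hall : ∀ c ∈ l.drop j, c = '=' := hsuffix_iff.mp hsuf
      have hcd : List.count '=' (l.drop j) = (l.drop j).length :=
        List.count_eq_length.mpr (fun b hb => (hall b hb).symm)
      have hkm : List.count '=' l = (l.drop j).length := by rw [hsplit, hcd]
      refine ⟨by omega, ?_, (List.eq_replicate_iff.mpr ⟨rfl, hall⟩)⟩
      intro c hc
      rcases hq c (List.mem_of_mem_take hc) with h | h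
      · exact h
      · exact absurd (h ▸ hc) F1
    · rintro ⟨h6, hb, hd⟩
      have hall : ∀ c ∈ l.drop j, c = '=' := by
        intro c hc
        rw [hd] at hc
        exact List.eq_of_mem_replicate hc
      have hcd : List.count '=' (l.drop j) = (l.drop j).length :=
        List.count_eq_length.mpr (fun b hb => (hall b hb).symm)
      have hkm : List.count '=' l = (l.drop j).length := by rw [hsplit, hcd]
      constructor
      · intro c hc
        have hc' : c ∈ l.take j ++ l.drop j := by rw [List.take_append_drop]; exact hc
        rcases List.mem_append.mp hc' with h | h
        · exact Or.inl (hb c h)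
        · exact Or.inr (hall c h)
      · exact fun _ => ⟨by omega, hsuffix_iff.mpr hall⟩
  · -- no '=' in l
    have hcnt : List.count '=' l = 0 := List.count_eq_zero.mpr hm
    have hfind : PySem.Chars.find l ['='] = -1 :=
      (PySem.Chars.find_eq_neg_one_iff ..).mpr (by simpa [List.singleton_infix_iff] using hm)
    rw [hcnt, hfind]
    have hT : (((-1:Int)) == -1) = true := rfl
    simp only [hT, if_true, List.length_nil, Nat.cast_zero, List.replicate_zero,
      show ((0:Nat) > 0) = False by simp, show ((0:Int) > 6) = False by norm_num, if_false]
    have hAB : (l.all fun c =>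
        PySem.Str.isIn (String.ofList [c]) pvB32Alpha
          || PySem.Str.isIn (String.ofList [c]) pvB32Pad)
        = (l.all fun c => PySem.Str.isIn (String.ofList [c]) pvB32Alpha) := by
      rw [Bool.eq_iff_iff, List.all_eq_true, List.all_eq_true]
      refine forall_congr' fun c => imp_congr_right fun hc => ?_
      simp only [Bool.or_eq_true, pv_mem_single_iff,
        show pvB32Pad.toList = ['='] from rfl, List.mem_singleton]
      constructor
      · rintro (h | h)
        · exact h
        · exact absurd (h ▸ hc) hm
      · exact Or.inl
    rw [hAB]
    cases (l.all fun c => PySem.Str.isIn (String.ofList [c]) pvB32Alpha) <;> simp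

lemma pv_pad_toList : pvB32Pad.toList = ['='] := by decide

lemma pv_main (data : String) : is_valid_base32 data = is_valid_base32_alt data := by
  unfold is_valid_base32 is_valid_base32_alt
  by_cases h0 : (PySem.Str.len data == 0) = true
  · rw [if_pos h0, if_pos h0]
  · rw [if_neg h0, if_neg h0]
    simp only [PySem.Str.count_eq, PySem.Str.endswith_eq, PySem.Str.find_eq,
      apply_ite String.toList,
      PySem.Str.toList_slice, PySem.Chars.slice_eq_listSlice, String.toList_ofList,
      PySem.Str.len_eq, pv_pad_toList, pv_count_singleton]
    generalize (PySem.Str.strip (PySem.Str.upper data)).toList = l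
    by_cases hnil : l = []
    · subst hnil
      have t1 : ((List.length ([]:List Char) : Int) < 1) := by simp
      have t2 : (((List.length ([]:List Char) : Int)) == 0) = true := by simp
      rw [if_pos t1, if_pos t2]
    · have hlen : l.length ≠ 0 := fun h => hnil (List.eq_nil_of_length_eq_zero h)
      have h1 : ¬ ((l.length : Int) < 1) := by omega
      have h2 : ¬ (((l.length : Int) == 0) = true) := by
        simp only [beq_iff_eq]
        omega
      rw [if_neg h1, if_neg h2]
      have hemp : ("".toList : List Char) = [] := rfl
      rw [hemp]
      exact pv_core_eq l

-- ===== VERDICT (by name: the statement is the Claim_ definition above) =====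
theorem is_valid_base32_spec : Claim_equal_is_valid_base32 := by
  intro data _
  unfold Spec_is_valid_base32
  exact pv_main data
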